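-- pv_equiv track=rewrite | github.com/aadya75/agentic-chatbot-final | backend/knowledge_engine/club/embedding_generator.py | _group_by_source
-- ===== SOURCE A (Python) =====
-- from typing import List, Dict, Any, Optional
--
-- def _group_by_source(
--     chunks: List[Dict[str, Any]]
-- ) -> Dict[str, List[Dict[str, Any]]]:
--     groups: Dict[str, List[Dict[str, Any]]] = {}
--     for chunk in chunks:
--         source = chunk.get("metadata", {}).get("source", "unknown")
--         groups.setdefault(source, []).append(chunk)
--     return groups
-- ===== SOURCE B (Python) =====
-- def _group_by_source(chunks):
--     if not chunks:
--         return {}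
--     key = chunks[0].get("metadata", {}).get("source", "unknown")
--     same = [c for c in chunks
--             if c.get("metadata", {}).get("source", "unknown") == key]
--     rest = [c for c in chunks
--             if c.get("metadata", {}).get("source", "unknown") != key]
--     out = {key: same}
--     out.update(_group_by_source(rest))
--     return out
-- ===== Notes on version B (the rewrite author's own statement) =====
-- stated objective: alternative
-- what changed: Replaces the one-pass dict setdefault-append accumulation with recursion by partition: take the first chunk's source key, split the list into that key's group and the rest, and recurse on the rest; no dict accumulator is maintained.
import Mathlib
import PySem

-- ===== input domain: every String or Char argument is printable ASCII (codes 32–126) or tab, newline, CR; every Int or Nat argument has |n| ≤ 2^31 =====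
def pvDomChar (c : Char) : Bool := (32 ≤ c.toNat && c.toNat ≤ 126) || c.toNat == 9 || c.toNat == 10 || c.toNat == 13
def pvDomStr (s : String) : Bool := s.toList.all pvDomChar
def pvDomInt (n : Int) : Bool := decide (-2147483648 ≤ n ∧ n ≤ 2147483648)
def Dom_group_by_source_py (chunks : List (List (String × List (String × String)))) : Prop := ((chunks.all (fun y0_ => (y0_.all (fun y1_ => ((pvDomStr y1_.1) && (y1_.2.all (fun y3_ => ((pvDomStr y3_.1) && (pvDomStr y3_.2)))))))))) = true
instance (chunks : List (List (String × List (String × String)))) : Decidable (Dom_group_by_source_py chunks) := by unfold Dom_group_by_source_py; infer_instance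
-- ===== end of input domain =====

-- B replaces A's one-pass dict accumulation by recursion on the chunk list: split off the
-- first chunk's whole group, recurse on the remainder; alternative decomposition, not faster.

-- ===== PORT A =====
-- chunk.get("metadata", {}).get("source", "unknown")  (shared by both Pythons verbatim)
def pvKey (c : List (String × List (String × String))) : String :=
  PySem.Dict.getD (PySem.Dict.mk ((PySem.Dict.mk c).getD "metadata" [])) "source" "unknown"

-- groups.setdefault(source, []).append(chunk) mutates the stored list in place:
-- exactly groups[source] = groups.get(source, []) + [chunk], i.e. Dict.modify.
def group_by_source_py (chunks : List (List (String × List (String × String)))) : List (String × List (List (String × List (String × String)))) :=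
  (chunks.foldl (fun g c => g.modify (pvKey c) [] (· ++ [c])) PySem.Dict.empty).items

-- ===== PORT B =====
-- recursion by partition: the witness for termination is that `rest` omits the head chunk
def group_by_source_py_alt : List (List (String × List (String × String))) → List (String × List (List (String × List (String × String))))
  | [] => []
  | c :: cs =>
    let key := pvKey c
    let same := (c :: cs).filter (fun x => pvKey x == key)
    let rest := (c :: cs).filter (fun x => !(pvKey x == key))
    (key, same) :: group_by_source_py_alt rest
  termination_by chunks => chunks.length
  decreasing_by
    simp only [List.filter_cons, BEq.rfl, Bool.not_true, List.length_cons]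
    exact Nat.lt_succ_of_le (List.length_filter_le _ _)

-- ===== PRECONDITION & SPEC =====
def Spec_group_by_source_py (chunks : List (List (String × List (String × String)))) (out : List (String × List (List (String × List (String × String))))) : Prop := out = group_by_source_py_alt chunks
instance (chunks : List (List (String × List (String × String)))) (out : List (String × List (List (String × List (String × String))))) : Decidable (Spec_group_by_source_py chunks out) := by
  unfold Spec_group_by_source_py
  letI d1 : DecidableEq (List (String × List (String × String))) := inferInstance
  letI d2 : DecidableEq (List (List (String × List (String × String)))) := instDecidableEqList
  letI d3 : DecidableEq (String × List (List (String × List (String × String)))) := instDecidableEqProd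
  exact instDecidableEqList _ _

-- ===== CLAIM (what is proved, stated in full; the proofs are below) =====
def Claim_equal_group_by_source_py : Prop := ∀ (chunks : List (List (String × List (String × String)))), Dom_group_by_source_py chunks → Spec_group_by_source_py chunks (group_by_source_py chunks)

-- ===== LEMMAS AND PROOFS =====

-- A's dict after the loop, looked up at any key, is the per-key filter of the chunk list.
theorem pv_getD_loop (chunks : List (List (String × List (String × String)))) (k : String) :
    (chunks.foldl (fun g c => g.modify (pvKey c) [] (· ++ [c])) PySem.Dict.empty).getD k []
      = chunks.filter (fun c => pvKey c == k) := by
  have h := PySem.Dict.getD_foldl_modify_append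
      (l := chunks.map (fun c => (pvKey c, c))) (d := PySem.Dict.empty) (c := k)
  rw [List.foldl_map] at h
  simp only [PySem.Dict.getD_empty, List.nil_append] at h
  rw [h, List.filter_map]
  simp [Function.comp_def]

-- A's key list after the loop is the ordered dedup of the chunk keys.
theorem pv_keys_loop (chunks : List (List (String × List (String × String)))) :
    (chunks.foldl (fun g c => g.modify (pvKey c) [] (· ++ [c])) PySem.Dict.empty).keys
      = PySem.Set.ofList (chunks.map pvKey) := by
  rw [PySem.Dict.keys_foldl_modify_key]
  simp [PySem.Set.update_nil_left, PySem.Dict.keys_empty]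

-- filtering commutes with Python-ordered dedup (first occurrences kept)
theorem pv_filter_ofList {α : Type} [BEq α] [LawfulBEq α] (p : α → Bool) (l : List α) :
    (PySem.Set.ofList l).filter p = PySem.Set.ofList (l.filter p) := by
  induction l with
  | nil => rfl
  | cons x xs ih =>
    rw [PySem.Set.ofList_cons, List.filter_cons]
    by_cases h : p x
    · rw [if_pos h, List.filter_cons_of_pos h, PySem.Set.ofList_cons, PySem.Set.discard,
        PySem.Set.discard, List.filter_comm, ih]
    · rw [if_neg h, List.filter_cons_of_neg h, PySem.Set.discard,
        List.filter_comm, ih, List.filter_eq_self.mpr]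
      intro a ha
      have hpa := List.of_mem_filter ((PySem.Set.mem_ofList (xs.filter p) a).mp ha)
      simp only [Bool.not_eq_eq_eq_not, Bool.not_true, beq_eq_false_iff_ne, ne_eq]
      intro hax
      exact h (by rwa [hax] at hpa)
-- B computes the canonical form: dedup'd keys, each paired with its filter of the whole list.
theorem pv_alt_canon (chunks : List (List (String × List (String × String)))) :
    group_by_source_py_alt chunks
      = (PySem.Set.ofList (chunks.map pvKey)).map
          (fun k => (k, chunks.filter (fun c => pvKey c == k))) := by
  induction chunks using group_by_source_py_alt.induct with
  | case1 => simp [group_by_source_py_alt]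
  | case2 c cs key rest ih =>
    rw [group_by_source_py_alt]
    have hhead : (pvKey c == key) = true := by simp [key]
    have hrest : rest = cs.filter (fun x => !(pvKey x == key)) := by
      simp only [rest, List.filter_cons, hhead, Bool.not_true, Bool.false_eq_true, if_false]
    have hmap : rest.map pvKey = (cs.map pvKey).filter (fun y => !(y == key)) := by
      rw [hrest, List.filter_map]; rfl
    have hof : PySem.Set.ofList (rest.map pvKey)
        = (PySem.Set.ofList (cs.map pvKey)).filter (fun y => !(y == key)) := by
      rw [hmap, pv_filter_ofList]
    rw [ih, hof]
    have hmapcs : (c :: cs).map pvKey = key :: cs.map pvKey := rfl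
    rw [hmapcs, PySem.Set.ofList_cons, List.map_cons]
    refine congrArg₂ List.cons rfl ?_
    simp only [PySem.Set.discard]
    apply List.map_congr_left
    intro k' hk'
    have hne : (k' == key) = false := by
      have := List.of_mem_filter hk'
      simpa using this
    have hck : (pvKey c == k') = false := by
      simp only [beq_eq_false_iff_ne, ne_eq] at hne ⊢
      have : pvKey c = key := by simp [key]
      rw [this]; exact fun h => hne h.symm
    refine congrArg (fun l => (k', l)) ?_
    rw [hrest, List.filter_comm, List.filter_cons, hck]
    simp only [Bool.false_eq_true, if_false]
    rw [List.filter_eq_self.mpr]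
    intro a ha
    have hak : pvKey a = k' := by
      have := List.of_mem_filter ha
      simpa using this
    simp only [hak, Bool.not_eq_eq_eq_not, Bool.not_true, beq_eq_false_iff_ne, ne_eq]
    simp only [beq_eq_false_iff_ne, ne_eq] at hne
    have hkey : pvKey c = key := by simp [key]
    exact hne

-- ===== VERDICT (by name: the statement is the Claim_ definition above) =====
theorem group_by_source_py_spec : Claim_equal_group_by_source_py := by
  intro chunks _
  unfold Spec_group_by_source_py group_by_source_py
  have hnd : (chunks.foldl (fun g c => g.modify (pvKey c) [] (· ++ [c])) PySem.Dict.empty).keys.Nodup :=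
    PySem.Dict.nodup_keys_foldl_modify_key _ _ _ _ _ PySem.Dict.nodup_keys_empty
  rw [PySem.Dict.items_eq_map_keys _ hnd ([] : List (List (String × List (String × String)))),
      pv_keys_loop, pv_alt_canon]
  exact List.map_congr_left (fun k _ => by rw [pv_getD_loop])
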